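-- pv_equiv track=rewrite | github.com/MohaKhalili/MyPy_TinyCodes | 09 - Midterm Exam/07 Midterm Exam, Part 7 (Pattern Sum).py | _chain_of_number_sample_ed2_
-- ===== SOURCE A (Python) =====
-- def _chain_of_number_sample_ed2_(a, b):
--     chain_list = []
--     my_sum = 0
--     for x in range(1, b+1):
--         chain_list.append(x*str(a))
--     for items in chain_list:
--         my_sum = my_sum + int(items)
--
--     return my_sum
-- ===== SOURCE B (Python) =====
-- def _chain_of_number_sample_ed2_(a, b):
--     s = str(a)
--
--     def total(lo, hi):  # sum of int(s * k) for lo <= k <= hi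
--         if lo > hi:
--             return 0
--         if lo == hi:
--             return int(s * lo)
--         mid = (lo + hi) // 2
--         return total(lo, mid) + total(mid + 1, hi)
--
--     return total(1, b)
-- ===== Notes on version B (the rewrite author's own statement) =====
-- stated objective: alternative
-- what changed: replaces A's two-pass build-a-list-then-accumulate scan with a recursive divide-and-conquer summation over the index range 1..b (a balanced tree of partial sums; order-independence of the sum is proved)
import Mathlib
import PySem

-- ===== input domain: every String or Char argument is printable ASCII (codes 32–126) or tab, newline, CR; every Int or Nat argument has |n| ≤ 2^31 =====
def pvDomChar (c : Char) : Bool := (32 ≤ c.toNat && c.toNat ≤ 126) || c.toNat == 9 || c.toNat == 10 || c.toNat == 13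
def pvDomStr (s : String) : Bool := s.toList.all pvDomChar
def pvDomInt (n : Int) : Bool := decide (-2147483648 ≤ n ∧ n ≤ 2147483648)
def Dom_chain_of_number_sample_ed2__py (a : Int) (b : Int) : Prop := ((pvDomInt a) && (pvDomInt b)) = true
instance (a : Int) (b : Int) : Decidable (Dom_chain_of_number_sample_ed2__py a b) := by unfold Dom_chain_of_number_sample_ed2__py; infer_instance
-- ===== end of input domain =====

-- B replaces A's build-then-accumulate two-pass loop by a recursive divide-and-conquer
-- summation over the index range 1..b (objective: alternative; same values, different traversal).


-- ===== PORT A =====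
-- literal port of A: build chain_list = [x*str(a) for x in range(1,b+1)] (string repetition
-- ported exactly as PySem.List.pyRepeat on the character list), then sum int(items) over it.
-- int(items) = PySem.Int.ofChars?; under Pre_ it always succeeds, so '.getD 0' is never taken.
def chain_of_number_sample_ed2__py (a : Int) (b : Int) : Int :=
  let chain_list : List (List Char) :=
    (PySem.List.pyRange 1 (b + 1) 1).foldl
      (fun acc x => acc ++ [PySem.List.pyRepeat (PySem.Int.toChars a) x]) []
  chain_list.foldl (fun my_sum items => my_sum + (PySem.Int.ofChars? items).getD 0) 0

-- ===== PORT B =====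
-- literal port of Source B's inner helper: total(lo, hi) = sum of int(s*k) for lo <= k <= hi,
-- by splitting the range at mid = (lo+hi)//2; int(s*lo) = PySem.Int.ofChars? (getD 0 as in A's port).
def pvTotal (cs : List Char) (lo hi : Int) : Int :=
  if _h1 : lo > hi then 0
  else if _h2 : lo = hi then (PySem.Int.ofChars? (PySem.List.pyRepeat cs lo)).getD 0
  else
    pvTotal cs lo (PySem.Int.floordiv (lo + hi) 2) +
    pvTotal cs (PySem.Int.floordiv (lo + hi) 2 + 1) hi
termination_by (hi + 1 - lo).toNat
decreasing_by
  · have hlt : lo < hi := by omega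
    have h := (PySem.Int.floordiv_lt_iff_lt_mul (a := lo + hi) (q := hi) (by omega : (0:Int) < 2)).mpr (by omega)
    have h' := (PySem.Int.le_floordiv_iff_mul_le (a := lo + hi) (q := lo) (by omega : (0:Int) < 2)).mpr (by omega)
    omega
  · have hlt : lo < hi := by omega
    have h := (PySem.Int.floordiv_lt_iff_lt_mul (a := lo + hi) (q := hi) (by omega : (0:Int) < 2)).mpr (by omega)
    have h' := (PySem.Int.le_floordiv_iff_mul_le (a := lo + hi) (q := lo) (by omega : (0:Int) < 2)).mpr (by omega)
    omega

-- literal port of Source B: s = str(a); return total(1, b)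
def chain_of_number_sample_ed2__py_alt (a : Int) (b : Int) : Int :=
  pvTotal (PySem.Int.toChars a) 1 b

-- ===== PRECONDITION & SPEC =====
-- Pre_ excludes exactly the inputs where A raises ValueError: a < 0 with b ≥ 2, since the second
-- repetition "−d…−d…" is not a valid int literal (B raises the same ValueError there).
def Pre_chain_of_number_sample_ed2__py (a : Int) (b : Int) : Prop := 0 ≤ a ∨ b ≤ 1
instance (a : Int) (b : Int) : Decidable (Pre_chain_of_number_sample_ed2__py a b) := by unfold Pre_chain_of_number_sample_ed2__py; infer_instance
def pvWitness_chain_of_number_sample_ed2__py : Int × Int := (7, 3)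
def Spec_chain_of_number_sample_ed2__py (a : Int) (b : Int) (out : Int) : Prop := out = chain_of_number_sample_ed2__py_alt a b
instance (a : Int) (b : Int) (out : Int) : Decidable (Spec_chain_of_number_sample_ed2__py a b out) := by unfold Spec_chain_of_number_sample_ed2__py; infer_instance

-- ===== CLAIM (what is proved, stated in full; the proofs are below) =====
def Claim_equal_chain_of_number_sample_ed2__py : Prop := ∀ (a : Int) (b : Int), Dom_chain_of_number_sample_ed2__py a b → Pre_chain_of_number_sample_ed2__py a b → Spec_chain_of_number_sample_ed2__py a b (chain_of_number_sample_ed2__py a b)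

-- ===== LEMMAS AND PROOFS =====
-- the summand both programs add for chain length k
def pvG (cs : List Char) (k : Int) : Int := (PySem.Int.ofChars? (PySem.List.pyRepeat cs k)).getD 0

theorem foldl_append_map {α β : Type} (g : α → β) (l : List α) (init : List β) :
    l.foldl (fun acc x => acc ++ [g x]) init = init ++ l.map g := by
  induction l generalizing init with
  | nil => simp
  | cons x xs ih => simp [List.foldl_cons, ih]

-- A's value: the sum of pvG over range(1, b+1)
theorem A_eval (a b : Int) :
    chain_of_number_sample_ed2__py a b
      = ((PySem.List.pyRange 1 (b + 1) 1).map (pvG (PySem.Int.toChars a))).sum := by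
  unfold chain_of_number_sample_ed2__py
  rw [foldl_append_map, List.nil_append, PySem.List.foldl_add, List.map_map, zero_add]
  rfl

-- B's value: divide-and-conquer over [lo, hi] sums pvG over range(lo, hi+1)
theorem pvTotal_eval (cs : List Char) :
    ∀ (n : Nat) (lo hi : Int), (hi + 1 - lo).toNat = n →
      pvTotal cs lo hi = ((PySem.List.pyRange lo (hi + 1) 1).map (pvG cs)).sum := by
  intro n
  induction n using Nat.strong_induction_on with
  | _ n ih =>
    intro lo hi hn
    rw [pvTotal]
    split_ifs with h1 h2
    · rw [PySem.List.pyRange_one_eq_nil (by omega)]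
      simp
    · subst h2
      rw [PySem.List.pyRange_one_singleton]
      simp [pvG]
    · have hlt : lo < hi := by omega
      have hm2 := (PySem.Int.floordiv_lt_iff_lt_mul (a := lo + hi) (q := hi) (by omega : (0:Int) < 2)).mpr (by omega)
      have hm1 := (PySem.Int.le_floordiv_iff_mul_le (a := lo + hi) (q := lo) (by omega : (0:Int) < 2)).mpr (by omega)
      set mid := PySem.Int.floordiv (lo + hi) 2 with hmid
      rw [PySem.List.pyRange_one_append lo (mid + 1) (hi + 1) (by omega) (by omega),
          List.map_append, List.sum_append]
      rw [ih (mid + 1 - lo).toNat (by omega) lo mid rfl,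
          ih (hi + 1 - (mid + 1)).toNat (by omega) (mid + 1) hi rfl]

-- ===== VERDICT (by name: the statement is the Claim_ definition above) =====
theorem chain_of_number_sample_ed2__py_spec : Claim_equal_chain_of_number_sample_ed2__py := by
  intro a b _ _
  unfold Spec_chain_of_number_sample_ed2__py chain_of_number_sample_ed2__py_alt
  rw [A_eval, pvTotal_eval (PySem.Int.toChars a) (b + 1 - 1).toNat 1 b rfl]
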